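-- pv_equiv track=rewrite | github.com/parkjuno0309/ScoreStory | ScoreStory/score.py | combine_batter_stats
-- ===== SOURCE A (Python) =====
-- def combine_batter_stats(hits, rbis):
--     combined_stats = {}
--
--     for player, hit_count in hits.items():
--         if player not in combined_stats:
--             combined_stats[player] = {'hits': 0, 'RBIs': 0}
--         combined_stats[player]['hits'] = hit_count
--
--     for inning, rbi_list in rbis.items():
--         for rbi_data in rbi_list:
--             player, rbi_count = rbi_data
--             if player not in combined_stats:
--                 combined_stats[player] = {'hits': 0, 'RBIs': 0}
--             combined_stats[player]['RBIs'] += rbi_count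
--
--     # Remove players with 0 hits and 0 RBIs
--     combined_stats = {player: stats for player, stats in combined_stats.items(
--     ) if stats['hits'] > 0 or stats['RBIs'] > 0}
--
--     return combined_stats
-- ===== SOURCE B (Python) =====
-- def combine_batter_stats(hits, rbis):
--     # ordered list of candidate players: hits keys, then new players in RBI order
--     seen = []
--     for player in hits:
--         if player not in seen:
--             seen.append(player)
--     for rbi_list in rbis.values():
--         for player, _ in rbi_list:
--             if player not in seen:
--                 seen.append(player)
--
--     result = {}
--     for player in seen:
--         h = hits.get(player, 0)
--         r = sum(c for rbi_list in rbis.values() for p, c in rbi_list if p == player)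
--         if h > 0 or r > 0:
--             result[player] = {'hits': h, 'RBIs': r}
--     return result
-- ===== Notes on version B (the rewrite author's own statement) =====
-- stated objective: alternative
-- what changed: A accumulates per-player totals incrementally into one merged dict of mutable stat dicts and post-filters it; B keeps no running totals at all: it first collects the ordered list of candidate players, then for each player recomputes its RBI total by a fresh brute-force scan over the rbis data and emits the filtered entry directly (trading A's O(n) hash accumulation for a per-player rescan).
import Mathlib
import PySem

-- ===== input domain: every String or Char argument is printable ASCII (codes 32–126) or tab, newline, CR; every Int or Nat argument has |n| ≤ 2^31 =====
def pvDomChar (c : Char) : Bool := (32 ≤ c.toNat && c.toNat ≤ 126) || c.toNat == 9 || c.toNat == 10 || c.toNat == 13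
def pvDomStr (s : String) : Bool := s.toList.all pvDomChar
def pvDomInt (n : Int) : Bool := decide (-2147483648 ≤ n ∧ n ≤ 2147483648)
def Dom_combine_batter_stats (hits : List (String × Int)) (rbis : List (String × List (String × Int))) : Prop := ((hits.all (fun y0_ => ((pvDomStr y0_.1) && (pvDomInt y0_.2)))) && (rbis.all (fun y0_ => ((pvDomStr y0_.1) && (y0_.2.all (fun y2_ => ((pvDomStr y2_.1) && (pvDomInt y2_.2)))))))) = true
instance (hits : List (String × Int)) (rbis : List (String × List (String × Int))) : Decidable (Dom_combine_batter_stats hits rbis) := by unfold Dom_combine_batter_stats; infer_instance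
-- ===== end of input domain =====

-- B keeps no running totals: it collects the ordered candidate-player list, then recomputes each
-- player's RBI total by a fresh scan of the rbis data and emits filtered entries directly,
-- replacing A's accumulate-into-a-merged-dict-then-filter pipeline (objective: alternative).

-- ===== PORT A =====
-- {'hits': 0, 'RBIs': 0}
def pvZero : PySem.Dict String Int := PySem.Dict.ofList [("hits", 0), ("RBIs", 0)]

-- body of A's first loop: default-insert, then combined_stats[player]['hits'] = hit_count
def pvStepHit (c : PySem.Dict String (PySem.Dict String Int)) (pr : String × Int) :
    PySem.Dict String (PySem.Dict String Int) :=
  let c := if c.contains pr.1 then c else c.insert pr.1 pvZero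
  c.modify pr.1 pvZero (fun d => d.insert "hits" pr.2)

-- body of A's inner RBI loop: default-insert, then combined_stats[player]['RBIs'] += rbi_count
def pvStepRBI (c : PySem.Dict String (PySem.Dict String Int)) (pr : String × Int) :
    PySem.Dict String (PySem.Dict String Int) :=
  let c := if c.contains pr.1 then c else c.insert pr.1 pvZero
  c.modify pr.1 pvZero (fun d => d.insert "RBIs" (d.getD "RBIs" 0 + pr.2))

def combine_batter_stats (hits : List (String × Int)) (rbis : List (String × List (String × Int))) : List (String × List (String × Int)) :=
  let c1 := (PySem.Dict.ofList hits).items.foldl pvStepHit PySem.Dict.empty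
  let c2 := (PySem.Dict.ofList rbis).items.foldl (fun c pr => pr.2.foldl pvStepRBI c) c1
  -- {player: stats for … if stats['hits'] > 0 or stats['RBIs'] > 0}
  let c3 := PySem.Dict.mk (c2.items.filter (fun ps => decide (0 < ps.2.getD "hits" 0) || decide (0 < ps.2.getD "RBIs" 0)))
  c3.items.map (fun ps => (ps.1, ps.2.items))

-- ===== PORT B =====
def combine_batter_stats_alt (hits : List (String × Int)) (rbis : List (String × List (String × Int))) : List (String × List (String × Int)) :=
  let hitsD := PySem.Dict.ofList hits
  let rbisD := PySem.Dict.ofList rbis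
  -- seen: hits keys, then RBI players not yet seen, in order (list-dedup append = Set.add)
  let seen0 := hitsD.keys.foldl (fun s p => PySem.Set.add s p) ([] : List String)
  let seen := rbisD.items.foldl (fun s pr => pr.2.foldl (fun s q => PySem.Set.add s q.1) s) seen0
  -- one pass over seen: recompute r by a fresh nested scan of rbis (the sum(...) generator)
  seen.foldl
    (fun res p =>
      let h := hitsD.getD p 0
      let r := rbisD.items.foldl
        (fun acc pr => pr.2.foldl (fun acc q => if q.1 == p then acc + q.2 else acc) acc) (0 : Int)
      if decide (0 < h) || decide (0 < r) then res ++ [(p, [("hits", h), ("RBIs", r)])] else res)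
    []

-- ===== PRECONDITION & SPEC =====
def Spec_combine_batter_stats (hits : List (String × Int)) (rbis : List (String × List (String × Int))) (out : List (String × List (String × Int))) : Prop := out = combine_batter_stats_alt hits rbis
instance (hits : List (String × Int)) (rbis : List (String × List (String × Int))) (out : List (String × List (String × Int))) : Decidable (Spec_combine_batter_stats hits rbis out) := by unfold Spec_combine_batter_stats; infer_instance

-- ===== CLAIM (what is proved, stated in full; the proofs are below) =====
def Claim_equal_combine_batter_stats : Prop := ∀ (hits : List (String × Int)) (rbis : List (String × List (String × Int))), Dom_combine_batter_stats hits rbis → Spec_combine_batter_stats hits rbis (combine_batter_stats hits rbis)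

-- ===== LEMMAS AND PROOFS =====

def pvToDict (M : List (String × Int × Int)) : PySem.Dict String (PySem.Dict String Int) :=
  PySem.Dict.mk (M.map (fun t => (t.1, PySem.Dict.mk [("hits", t.2.1), ("RBIs", t.2.2)])))

theorem pvToDict_keys (M : List (String × Int × Int)) : (pvToDict M).keys = M.map (·.1) := by
  simp [pvToDict, PySem.Dict.keys, List.map_map]

theorem pvToDict_contains (M : List (String × Int × Int)) (p : String) :
    (pvToDict M).contains p = (M.map (·.1)).contains p := by
  simp only [pvToDict, PySem.Dict.contains, List.any_map]
  rw [Bool.eq_iff_iff]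
  constructor
  · intro h
    rcases List.any_eq_true.mp h with ⟨t, ht, he⟩
    have : p ∈ M.map (·.1) := List.mem_map.mpr ⟨t, ht, beq_iff_eq.mp he⟩
    simpa using this
  · intro h
    rcases List.mem_map.mp (by simpa using h : p ∈ M.map (·.1)) with ⟨t, ht, he⟩
    exact List.any_eq_true.mpr ⟨t, ht, beq_iff_eq.mpr he⟩

theorem pvInner_getD_hits (x y : Int) : (PySem.Dict.mk [("hits", x), ("RBIs", y)]).getD "hits" 0 = x := by
  simp [PySem.Dict.getD, PySem.Dict.get?]

theorem pvInner_getD_rbis (x y : Int) : (PySem.Dict.mk [("hits", x), ("RBIs", y)]).getD "RBIs" 0 = y := by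
  simp [PySem.Dict.getD, PySem.Dict.get?, List.find?]

theorem pvInner_insert_rbis (x y v : Int) :
    (PySem.Dict.mk [("hits", x), ("RBIs", y)]).insert "RBIs" v = PySem.Dict.mk [("hits", x), ("RBIs", v)] := by
  simp [PySem.Dict.insert, PySem.Dict.contains]

theorem pvInner_insert_hits (x y v : Int) :
    (PySem.Dict.mk [("hits", x), ("RBIs", y)]).insert "hits" v = PySem.Dict.mk [("hits", v), ("RBIs", y)] := by
  simp [PySem.Dict.insert, PySem.Dict.contains]

def pvStepM (M : List (String × Int × Int)) (q : String × Int) : List (String × Int × Int) :=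
  if (M.map (·.1)).contains q.1 then
    M.map (fun t => if t.1 == q.1 then (t.1, t.2.1, t.2.2 + q.2) else t)
  else M ++ [(q.1, 0, q.2)]

theorem pvStepRBI_toDict (M : List (String × Int × Int)) (q : String × Int)
    (h : (M.map (·.1)).Nodup) : pvStepRBI (pvToDict M) q = pvToDict (pvStepM M q) := by
  by_cases hc : (M.map (·.1)).contains q.1 = true
  · -- existing key
    rcases List.mem_map.mp (by simpa using hc : q.1 ∈ M.map (·.1)) with ⟨t, ht, hte⟩
    have hmem : (q.1, PySem.Dict.mk [("hits", t.2.1), ("RBIs", t.2.2)]) ∈ (pvToDict M).items := by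
      simp only [pvToDict]
      exact List.mem_map.mpr ⟨t, ht, by rw [hte]⟩
    have hkeys : (pvToDict M).keys.Nodup := by rw [pvToDict_keys]; exact h
    have hget : (pvToDict M).getD q.1 pvZero = PySem.Dict.mk [("hits", t.2.1), ("RBIs", t.2.2)] :=
      PySem.Dict.getD_of_mem_items _ hmem hkeys _
    have hcont : (pvToDict M).contains q.1 = true := by rw [pvToDict_contains]; exact hc
    simp only [pvStepRBI, hcont, if_pos, PySem.Dict.modify, hget, pvInner_getD_rbis,
      pvInner_insert_rbis]
    have : (pvToDict M).insert q.1 (PySem.Dict.mk [("hits", t.2.1), ("RBIs", t.2.2 + q.2)]) =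
        PySem.Dict.mk (((pvToDict M).items).map
          (fun p => if p.1 == q.1 then (q.1, PySem.Dict.mk [("hits", t.2.1), ("RBIs", t.2.2 + q.2)]) else p)) := by
      have := PySem.Dict.items_insert_of_contains (pvToDict M)
        (PySem.Dict.mk [("hits", t.2.1), ("RBIs", t.2.2 + q.2)]) hcont
      exact PySem.Dict.ext this
    rw [this]
    simp only [pvStepM, hc, if_pos, pvToDict, List.map_map]
    congr 1
    apply List.map_congr_left
    intro a ha
    by_cases hae : a.1 = q.1
    · have hat : a = t := List.inj_on_of_nodup_map h ha ht (by rw [hae, hte])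
      subst hat
      simp [Function.comp, hte]
    · simp [Function.comp, hae]
  · -- new key
    have hcont : (pvToDict M).contains q.1 = false := by
      rw [pvToDict_contains]; exact Bool.not_eq_true _ ▸ (by simpa using hc)
    simp only [pvStepRBI, hcont, Bool.false_eq_true, if_false, PySem.Dict.modify,
      PySem.Dict.getD_insert_self, PySem.Dict.insert_insert_self]
    have hz : pvZero = PySem.Dict.mk [("hits", 0), ("RBIs", 0)] := rfl
    have : pvZero.insert "RBIs" (pvZero.getD "RBIs" 0 + q.2) = PySem.Dict.mk [("hits", 0), ("RBIs", q.2)] := by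
      rw [hz, pvInner_getD_rbis, pvInner_insert_rbis, Int.zero_add]
    rw [this]
    apply PySem.Dict.ext
    rw [PySem.Dict.items_insert_of_not_contains _ _ hcont]
    unfold pvStepM
    rw [if_neg hc]
    simp [pvToDict]

def pvNew (R : List (String × Int)) (ks : List String) : List String :=
  match R with
  | [] => []
  | q :: R' => if ks.contains q.1 then pvNew R' ks else q.1 :: pvNew R' (ks ++ [q.1])

def pvRsum (R : List (String × Int)) (p : String) : Int :=
  ((R.filter (fun q => q.1 == p)).map (·.2)).sum

theorem pvStepM_keys_nodup (M : List (String × Int × Int)) (q : String × Int)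
    (h : (M.map (·.1)).Nodup) : ((pvStepM M q).map (·.1)).Nodup := by
  unfold pvStepM
  by_cases hc : (M.map (·.1)).contains q.1 = true
  · rw [if_pos hc]
    have : (M.map (fun t => if t.1 == q.1 then (t.1, t.2.1, t.2.2 + q.2) else t)).map (·.1)
        = M.map (·.1) := by
      rw [List.map_map]
      apply List.map_congr_left
      intro a _
      by_cases hae : a.1 = q.1 <;> simp [Function.comp, hae]
    rw [this]; exact h
  · rw [if_neg hc]
    simp only [List.map_append, List.map_cons, List.map_nil]
    refine List.Nodup.append h (List.nodup_singleton _) ?_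
    intro x hx hx2
    rw [List.mem_singleton] at hx2
    subst hx2
    exact hc (by simpa using hx)

theorem pvFoldRBI_toDict (R : List (String × Int)) (M : List (String × Int × Int))
    (h : (M.map (·.1)).Nodup) :
    R.foldl pvStepRBI (pvToDict M) = pvToDict (R.foldl pvStepM M) := by
  induction R generalizing M with
  | nil => rfl
  | cons q R ih =>
    simp only [List.foldl_cons]
    rw [pvStepRBI_toDict M q h]
    exact ih _ (pvStepM_keys_nodup M q h)

theorem pvNew_not_mem (R : List (String × Int)) (ks : List String) (p : String)
    (hp : p ∈ pvNew R ks) : p ∉ ks := by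
  induction R generalizing ks with
  | nil => simp [pvNew] at hp
  | cons q R ih =>
    unfold pvNew at hp
    by_cases hc : ks.contains q.1 = true
    · rw [if_pos hc] at hp; exact ih ks hp
    · rw [if_neg hc] at hp
      rcases List.mem_cons.mp hp with hpq | hp'
      · subst hpq; intro hmem; exact hc (by simpa using hmem)
      · have := ih (ks ++ [q.1]) hp'
        intro hmem; exact this (List.mem_append_left _ hmem)

theorem pvRsum_cons (q : String × Int) (R : List (String × Int)) (p : String) :
    pvRsum (q :: R) p = (if q.1 = p then q.2 else 0) + pvRsum R p := by
  unfold pvRsum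
  by_cases hq : q.1 = p
  · simp [hq]
  · simp [hq]

theorem pvFoldM_closed (R : List (String × Int)) (M : List (String × Int × Int)) :
    R.foldl pvStepM M =
      M.map (fun t => (t.1, t.2.1, t.2.2 + pvRsum R t.1)) ++
      (pvNew R (M.map (·.1))).map (fun p => (p, 0, pvRsum R p)) := by
  induction R generalizing M with
  | nil => simp [pvNew, pvRsum]
  | cons q R ih =>
    simp only [List.foldl_cons]
    rw [ih (pvStepM M q)]
    unfold pvStepM
    by_cases hc : (M.map (·.1)).contains q.1 = true
    · rw [if_pos hc]
      have hkeys : (M.map (fun t => if t.1 == q.1 then (t.1, t.2.1, t.2.2 + q.2) else t)).map (·.1)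
          = M.map (·.1) := by
        rw [List.map_map]
        apply List.map_congr_left
        intro a _
        by_cases hae : a.1 = q.1 <;> simp [Function.comp, hae]
      rw [hkeys, List.map_map]
      have hnewq : pvNew (q :: R) (M.map (·.1)) = pvNew R (M.map (·.1)) := by
        unfold pvNew; rw [if_pos hc]; cases R <;> rfl
      rw [hnewq]
      congr 1
      · apply List.map_congr_left
        intro a _
        by_cases hae : a.1 = q.1
        · simp [Function.comp, hae, pvRsum_cons, add_assoc]
        · have hqa : ¬ q.1 = a.1 := fun he => hae he.symm
          simp [Function.comp, hae, hqa, pvRsum_cons]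
      · apply List.map_congr_left
        intro p hp
        have hnp := pvNew_not_mem R _ p hp
        have hqp : ¬ q.1 = p := by
          intro he
          subst he
          exact hnp (by simpa using hc)
        rw [pvRsum_cons, if_neg hqp, Int.zero_add]
    · rw [if_neg hc]
      have hnewq : pvNew (q :: R) (M.map (·.1)) = q.1 :: pvNew R (M.map (·.1) ++ [q.1]) := by
        unfold pvNew; rw [if_neg hc]; cases R <;> rfl
      rw [hnewq]
      simp only [List.map_append, List.map_cons, List.map_nil, List.append_assoc]
      congr 1
      · apply List.map_congr_left
        intro a ha
        have hane : a.1 ≠ q.1 := by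
          intro he
          exact hc (by simpa using List.mem_map.mpr ⟨a, ha, he⟩)
        have hqa : ¬ q.1 = a.1 := fun he => hane he.symm
        rw [pvRsum_cons, if_neg hqa, Int.zero_add]
      · simp only [List.singleton_append]
        congr 1
        · rw [pvRsum_cons, if_pos rfl]
        · apply List.map_congr_left
          intro p hp
          have hnp : p ∉ (M.map (·.1)) ++ [q.1] := pvNew_not_mem R _ p hp
          have hpq : ¬ q.1 = p := by
            intro he; exact hnp (List.mem_append_right _ (by simp [he]))
          rw [pvRsum_cons, if_neg hpq, Int.zero_add]

theorem pvFoldHit (H : List (String × Int)) (M : List (String × Int × Int))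
    (h : (M.map (·.1) ++ H.map (·.1)).Nodup) :
    H.foldl pvStepHit (pvToDict M) = pvToDict (M ++ H.map (fun pr => (pr.1, pr.2, 0))) := by
  induction H generalizing M with
  | nil => simp
  | cons q H ih =>
    simp only [List.foldl_cons]
    have hq : q.1 ∉ M.map (·.1) := by
      intro hmem
      rcases List.nodup_append.mp h with ⟨_, _, hdisj⟩
      exact hdisj _ hmem _ (by simp) rfl
    have hcont : (pvToDict M).contains q.1 = false := by
      rw [pvToDict_contains]
      simpa using hq
    have hstep : pvStepHit (pvToDict M) q = pvToDict (M ++ [(q.1, q.2, 0)]) := by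
      simp only [pvStepHit, hcont, Bool.false_eq_true, if_false, PySem.Dict.modify,
        PySem.Dict.getD_insert_self, PySem.Dict.insert_insert_self]
      have hz : pvZero = PySem.Dict.mk [("hits", 0), ("RBIs", 0)] := rfl
      rw [hz, pvInner_insert_hits]
      apply PySem.Dict.ext
      rw [PySem.Dict.items_insert_of_not_contains _ _ hcont]
      simp [pvToDict]
    rw [hstep, ih]
    · simp
    · simp only [List.map_append, List.map_cons, List.map_nil, List.append_assoc,
        List.singleton_append]
      simpa using h

-- B's per-player scan computes pvRsum
theorem pvScan_eq_pvRsum (R : List (String × Int)) (p : String) (acc : Int) :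
    R.foldl (fun acc q => if q.1 == p then acc + q.2 else acc) acc = acc + pvRsum R p := by
  induction R generalizing acc with
  | nil => simp [pvRsum]
  | cons q R ih =>
    simp only [List.foldl_cons]
    rw [ih, pvRsum_cons]
    by_cases hq : q.1 = p
    · simp [hq]; ring
    · simp [hq]

theorem pvUpdate_eq_append_new (R : List (String × Int)) (ks : List String) :
    PySem.Set.update ks (R.map (·.1)) = ks ++ pvNew R ks := by
  induction R generalizing ks with
  | nil => simp [pvNew, PySem.Set.update]
  | cons q R ih =>
    simp only [List.map_cons]
    rw [PySem.Set.update_cons]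
    by_cases hc : ks.contains q.1 = true
    · have hadd : PySem.Set.add ks q.1 = ks := by
        simp only [PySem.Set.add, PySem.Set.contains]
        rw [if_pos hc]
      rw [hadd, ih]
      congr 1
      unfold pvNew; rw [if_pos hc]; cases R <;> rfl
    · have hadd : PySem.Set.add ks q.1 = ks ++ [q.1] := by
        simp only [PySem.Set.add, PySem.Set.contains]
        rw [if_neg hc]
      rw [hadd, ih]
      have : pvNew (q :: R) ks = q.1 :: pvNew R (ks ++ [q.1]) := by
        unfold pvNew; rw [if_neg hc]; cases R <;> rfl
      rw [this]
      simp

theorem pvDict_contains_keys {ν : Type} (d : PySem.Dict String ν) (p : String) :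
    d.contains p = PySem.Set.contains d.keys p := by
  rw [PySem.Dict.contains_eq_decide_mem_keys]
  simp [PySem.Set.contains]

-- ===== VERDICT (by name: the statement is the Claim_ definition above) =====
theorem combine_batter_stats_spec : Claim_equal_combine_batter_stats := by
  intro hits rbis _
  unfold Spec_combine_batter_stats
  simp only [combine_batter_stats, combine_batter_stats_alt]
  rw [← List.foldl_flatMap (f := fun (pr : String × List (String × Int)) => pr.2) (g := pvStepRBI),
      ← List.foldl_flatMap (f := fun (pr : String × List (String × Int)) => pr.2)
        (g := fun (s : List String) (q : String × Int) => PySem.Set.add s q.1)]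
  set hitsD := PySem.Dict.ofList hits with hhitsD
  set H := hitsD.items with hH
  set R := ((PySem.Dict.ofList rbis).items).flatMap (fun pr => pr.2) with hR
  set M1 := H.map (fun pr => (pr.1, pr.2, (0 : Int))) with hM1
  -- key facts
  have hHnodup : (H.map (·.1)).Nodup := PySem.Dict.nodup_keys_ofList hits
  have hkeysH : hitsD.keys = H.map (·.1) := rfl
  -- A's first loop
  have h1 : H.foldl pvStepHit PySem.Dict.empty = pvToDict M1 := by
    have := pvFoldHit H [] (by simpa using hHnodup)
    simpa [pvToDict, hM1] using this
  rw [h1]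
  -- A's second loop
  have hM1keys : (M1.map (·.1)) = H.map (·.1) := by
    rw [hM1, List.map_map]; simp [Function.comp]
  have h2 : R.foldl pvStepRBI (pvToDict M1) = pvToDict (R.foldl pvStepM M1) :=
    pvFoldRBI_toDict R _ (by rw [hM1keys]; exact hHnodup)
  rw [h2, pvFoldM_closed, hM1keys]
  -- B's inner scan computes pvRsum
  have hscan : ∀ p : String,
      ((PySem.Dict.ofList rbis).items).foldl
        (fun acc pr => pr.2.foldl (fun acc q => if q.1 == p then acc + q.2 else acc) acc) (0 : Int)
      = pvRsum R p := by
    intro p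
    rw [← List.foldl_flatMap (f := fun (pr : String × List (String × Int)) => pr.2)
          (g := fun (acc : Int) (q : String × Int) => if q.1 == p then acc + q.2 else acc), ← hR,
        pvScan_eq_pvRsum, Int.zero_add]
  simp only [hscan]
  -- B's result loop as filter + map
  rw [PySem.List.foldl_append_if
        (p := fun p => decide (0 < hitsD.getD p 0) || decide (0 < pvRsum R p))
        (f := fun p => (p, [("hits", hitsD.getD p 0), ("RBIs", pvRsum R p)]))]
  -- B's seen list is hits keys then fresh RBI players
  have hseen0 : hitsD.keys.foldl (fun s p => PySem.Set.add s p) ([] : List String) = hitsD.keys := by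
    rw [← PySem.Set.ofList_eq_foldl]
    exact PySem.Set.ofList_eq_self_of_nodup _ (PySem.Dict.nodup_keys_ofList hits)
  have hseen : R.foldl (fun s q => PySem.Set.add s q.1) hitsD.keys
      = (H.map (·.1)) ++ pvNew R (H.map (·.1)) := by
    rw [← PySem.Set.update_map_eq_foldl_add, pvUpdate_eq_append_new, hkeysH]
  rw [hseen0, hseen]
  -- characterize A's merged table as a map over the player list
  have hhitskeysnodup : hitsD.keys.Nodup := PySem.Dict.nodup_keys_ofList hits
  have hpart1 : M1.map (fun t => (t.1, t.2.1, t.2.2 + pvRsum R t.1))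
      = (H.map (·.1)).map (fun p => (p, hitsD.getD p 0, pvRsum R p)) := by
    rw [hM1, List.map_map, List.map_map]
    apply List.map_congr_left
    intro pr hpr
    have : hitsD.getD pr.1 0 = pr.2 :=
      PySem.Dict.getD_of_mem_items hitsD (by simpa using hpr) hhitskeysnodup 0
    simp [Function.comp, this]
  have hpart2 : (pvNew R (H.map (·.1))).map (fun p => (p, (0 : Int), pvRsum R p))
      = (pvNew R (H.map (·.1))).map (fun p => (p, hitsD.getD p 0, pvRsum R p)) := by
    apply List.map_congr_left
    intro p hp
    have hnot : hitsD.contains p = false := by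
      rw [pvDict_contains_keys]
      have := pvNew_not_mem R _ p hp
      rw [hkeysH]
      simpa [PySem.Set.contains] using this
    rw [PySem.Dict.getD_of_not_contains hitsD 0 hnot]
  rw [hpart1, hpart2, ← List.map_append]
  simp only [List.nil_append, pvToDict, List.filter_map, List.map_map]
  have hcond : ((fun ps : String × PySem.Dict String Int => decide (0 < ps.2.getD "hits" 0) || decide (0 < ps.2.getD "RBIs" 0)) ∘
      ((fun t : String × Int × Int => (t.1, PySem.Dict.mk [("hits", t.2.1), ("RBIs", t.2.2)])) ∘
        (fun p => (p, hitsD.getD p 0, pvRsum R p))))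
      = fun p => decide (0 < hitsD.getD p 0) || decide (0 < pvRsum R p) := by
    funext p
    simp [Function.comp, pvInner_getD_hits, pvInner_getD_rbis]
  rw [hcond]
  apply List.map_congr_left
  intro p _
  simp [Function.comp]
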